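-- pv_equiv track=rewrite | github.com/MochaS29/meal-plans-commerce | agents/meal-planning/enhanced_agent.py | _generate_storage_tips
-- ===== SOURCE A (Python) =====
-- from typing import Dict, List, Optional, Any
--
-- def _generate_storage_tips(recipes: List[Dict]) -> List[str]:
--     """Generate storage tips based on recipe ingredients"""
--
--     tips = [
--         "Use glass containers for best freshness",
--         "Label everything with prep date",
--         "Store raw meats on bottom shelf"
--     ]
--
--     # Check for specific ingredients that need special storage
--     has_herbs = False
--     has_leafy_greens = False
--     has_berries = False
--
--     for recipe in recipes:
--         if recipe and recipe.get('ingredients'):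
--             ingredients_str = ' '.join(str(i) for i in recipe['ingredients']).lower()
--
--             if any(herb in ingredients_str for herb in ["basil", "cilantro", "parsley"]):
--                 has_herbs = True
--             if any(green in ingredients_str for green in ["lettuce", "spinach", "kale"]):
--                 has_leafy_greens = True
--             if any(berry in ingredients_str for berry in ["berries", "strawberr", "blueberr"]):
--                 has_berries = True
--
--     if has_herbs:
--         tips.append("Store fresh herbs like flowers in water, cover with plastic bag")
--     if has_leafy_greens:
--         tips.append("Wrap leafy greens in paper towels to absorb moisture")
--     if has_berries:
--         tips.append("Don't wash berries until ready to use")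
--
--     return tips
-- ===== SOURCE B (Python) =====
-- from typing import Dict, List, Optional, Any
--
-- def _generate_storage_tips(recipes: List[Dict]) -> List[str]:
--     """Generate storage tips based on recipe ingredients"""
--     tips = [
--         "Use glass containers for best freshness",
--         "Label everything with prep date",
--         "Store raw meats on bottom shelf",
--     ]
--     # Gathering pass: one combined lowercased corpus of all ingredient text.
--     corpus = ' '.join(
--         ' '.join(str(i) for i in recipe['ingredients'])
--         for recipe in recipes
--         if recipe and recipe.get('ingredients')
--     ).lower()
--     # Checking phase: table-driven keyword checks, in fixed order.
--     for keywords, tip in [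
--         (("basil", "cilantro", "parsley"),
--          "Store fresh herbs like flowers in water, cover with plastic bag"),
--         (("lettuce", "spinach", "kale"),
--          "Wrap leafy greens in paper towels to absorb moisture"),
--         (("berries", "strawberr", "blueberr"),
--          "Don't wash berries until ready to use"),
--     ]:
--         if any(k in corpus for k in keywords):
--             tips.append(tip)
--     return tips
-- ===== Notes on version B (the rewrite author's own statement) =====
-- stated objective: simpler
-- what changed: Replaces the per-recipe loop that ORs three boolean flags with a two-phase decomposition: one gathering pass builds a single space-joined lowercased corpus of all ingredient text, then a table of (keyword-group, tip) pairs is checked once against that corpus.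
import Mathlib
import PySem

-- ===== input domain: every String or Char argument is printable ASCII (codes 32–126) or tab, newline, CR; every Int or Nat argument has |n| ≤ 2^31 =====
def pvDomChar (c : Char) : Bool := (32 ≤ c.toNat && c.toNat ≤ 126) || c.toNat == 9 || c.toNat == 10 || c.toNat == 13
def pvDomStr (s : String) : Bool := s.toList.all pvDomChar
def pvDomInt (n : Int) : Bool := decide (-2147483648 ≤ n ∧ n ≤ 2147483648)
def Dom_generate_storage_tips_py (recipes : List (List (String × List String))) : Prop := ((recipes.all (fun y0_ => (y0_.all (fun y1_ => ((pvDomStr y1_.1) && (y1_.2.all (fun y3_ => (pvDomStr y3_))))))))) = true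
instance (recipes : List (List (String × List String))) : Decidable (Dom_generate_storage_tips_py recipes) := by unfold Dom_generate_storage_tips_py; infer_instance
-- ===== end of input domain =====

-- B replaces A's per-recipe flag loop by building one combined lowercased corpus string
-- and then running table-driven keyword checks once against it (objective: simpler).

-- ===== PORT A =====
-- shared helper: the guard 'recipe and recipe.get("ingredients")' (truthy = nonempty dict, key present, nonempty list)
def pvGuard (recipe : List (String × List String)) : Bool :=
  !recipe.isEmpty && !(((PySem.Dict.mk recipe).get? "ingredients").getD []).isEmpty

-- shared helper: recipe['ingredients'] (under the guard the key is present; getD [] is then exact)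
def pvIngr (recipe : List (String × List String)) : List String :=
  ((PySem.Dict.mk recipe).get? "ingredients").getD []

def generate_storage_tips_py (recipes : List (List (String × List String))) : List String :=
  let tips : List String :=
    ["Use glass containers for best freshness",
     "Label everything with prep date",
     "Store raw meats on bottom shelf"]
  -- the loop carries the three flags (has_herbs, has_leafy_greens, has_berries)
  let flags :=
    recipes.foldl (fun (st : Bool × Bool × Bool) recipe =>
      if pvGuard recipe then
        let ingredients_str := PySem.Str.lower (PySem.Str.join " " (pvIngr recipe))
        (st.1 || ["basil", "cilantro", "parsley"].any (fun herb => PySem.Str.isIn herb ingredients_str),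
         st.2.1 || ["lettuce", "spinach", "kale"].any (fun green => PySem.Str.isIn green ingredients_str),
         st.2.2 || ["berries", "strawberr", "blueberr"].any (fun berry => PySem.Str.isIn berry ingredients_str))
      else st) (false, false, false)
  tips
    ++ (if flags.1 then ["Store fresh herbs like flowers in water, cover with plastic bag"] else [])
    ++ (if flags.2.1 then ["Wrap leafy greens in paper towels to absorb moisture"] else [])
    ++ (if flags.2.2 then ["Don't wash berries until ready to use"] else [])

-- ===== PORT B =====
def generate_storage_tips_py_alt (recipes : List (List (String × List String))) : List String :=
  let corpus := PySem.Str.lower (PySem.Str.join " "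
    ((recipes.filter pvGuard).map (fun recipe => PySem.Str.join " " (pvIngr recipe))))
  let table : List (List String × String) :=
    [(["basil", "cilantro", "parsley"],
      "Store fresh herbs like flowers in water, cover with plastic bag"),
     (["lettuce", "spinach", "kale"],
      "Wrap leafy greens in paper towels to absorb moisture"),
     (["berries", "strawberr", "blueberr"],
      "Don't wash berries until ready to use")]
  table.foldl
    (fun tips kt => if kt.1.any (fun k => PySem.Str.isIn k corpus) then tips ++ [kt.2] else tips)
    ["Use glass containers for best freshness",
     "Label everything with prep date",
     "Store raw meats on bottom shelf"]

-- ===== PRECONDITION & SPEC =====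
def Spec_generate_storage_tips_py (recipes : List (List (String × List String))) (out : List String) : Prop := out = generate_storage_tips_py_alt recipes
instance (recipes : List (List (String × List String))) (out : List String) : Decidable (Spec_generate_storage_tips_py recipes out) := by unfold Spec_generate_storage_tips_py; infer_instance

-- ===== CLAIM (what is proved, stated in full; the proofs are below) =====
def Claim_equal_generate_storage_tips_py : Prop := ∀ (recipes : List (List (String × List String))), Dom_generate_storage_tips_py recipes → Spec_generate_storage_tips_py recipes (generate_storage_tips_py recipes)

-- ===== LEMMAS AND PROOFS =====

-- a prefix that avoids the char c cannot reach past it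
theorem pv_prefix_append_cons {k a b : List Char} {c : Char} (hc : c ∉ k) :
    k <+: a ++ c :: b → k <+: a := by
  induction k generalizing a with
  | nil => intro _; exact List.nil_prefix
  | cons y k' ih =>
    intro h
    cases a with
    | nil =>
      simp only [List.nil_append, List.cons_prefix_cons] at h
      exact absurd (h.1 ▸ List.mem_cons_self) hc
    | cons x a' =>
      simp only [List.cons_append, List.cons_prefix_cons] at h ⊢
      exact ⟨h.1, ih (fun hm => hc (List.mem_cons_of_mem _ hm)) h.2⟩

-- an infix avoiding the separator char lies wholly on one side of it
theorem pv_infix_append_cons_iff {k : List Char} {c : Char} (hc : c ∉ k)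
    (a b : List Char) : k <:+: a ++ c :: b ↔ k <:+: a ∨ k <:+: b := by
  induction a with
  | nil =>
    constructor
    · intro h
      rcases List.infix_cons_iff.mp (by simpa using h) with h | h
      · rcases List.prefix_nil.mp (pv_prefix_append_cons (a := []) hc (by simpa using h)) with rfl
        exact Or.inl List.nil_infix
      · exact Or.inr h
    · rintro (h | h)
      · rcases List.infix_nil.mp h with rfl
        simp
      · exact h.trans ⟨[c], [], by simp⟩
  | cons x a' ih =>
    constructor
    · intro h
      rcases List.infix_cons_iff.mp (by simpa using h) with h | h
      · exact Or.inl (pv_prefix_append_cons (a := x :: a') hc (by simpa using h)).isInfix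
      · rcases ih.mp h with h | h
        · exact Or.inl (List.infix_cons_iff.mpr (Or.inr h))
        · exact Or.inr h
    · rintro (h | h)
      · exact h.trans ⟨[], c :: b, by simp⟩
      · exact h.trans ⟨x :: a' ++ [c], [], by simp⟩

-- membership of a space-free keyword in the space-joined corpus = membership in some piece
theorem pv_isIn_join {k : List Char} (hne : k ≠ []) (hc : ' ' ∉ k) (ps : List (List Char)) :
    PySem.Chars.isIn k (PySem.Chars.join [' '] ps) = ps.any (fun p => PySem.Chars.isIn k p) := by
  induction ps with
  | nil =>
    simp only [List.any_nil]
    rw [Bool.eq_false_iff]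
    intro h
    have := PySem.Chars.isIn_iff_infix k _ |>.mp (by simpa [PySem.Chars.join, List.intercalate] using h)
    exact hne (List.infix_nil.mp this)
  | cons p ps ih =>
    cases ps with
    | nil => simp [PySem.Chars.join, List.intercalate]
    | cons q ps' =>
      have hjoin : PySem.Chars.join [' '] (p :: q :: ps') =
          p ++ ' ' :: PySem.Chars.join [' '] (q :: ps') := by
        simp [PySem.Chars.join, List.intercalate]
      rw [hjoin]
      have := pv_infix_append_cons_iff hc p (PySem.Chars.join [' '] (q :: ps'))
      rw [List.any_cons, ← ih]
      rcases hin : PySem.Chars.isIn k (p ++ ' ' :: PySem.Chars.join [' '] (q :: ps')) with _ | _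
      · have hnot := (Bool.eq_false_iff.mp hin)
        rw [Ne, PySem.Chars.isIn_iff_infix, this] at hnot
        rw [not_or] at hnot
        simp [Bool.eq_false_iff, Ne, PySem.Chars.isIn_iff_infix, hnot.1, hnot.2]
      · have hyes := (PySem.Chars.isIn_iff_infix _ _).mp hin
        rw [this] at hyes
        rcases hyes with h | h
        · simp [(PySem.Chars.isIn_iff_infix _ _).mpr h]
        · simp [(PySem.Chars.isIn_iff_infix _ _).mpr h]

-- lowercasing commutes with the space-join
theorem pv_lower_join (ps : List (List Char)) :
    PySem.Chars.lower (PySem.Chars.join [' '] ps) =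
      PySem.Chars.join [' '] (ps.map PySem.Chars.lower) := by
  induction ps with
  | nil => simp [PySem.Chars.join, List.intercalate, PySem.Chars.lower]
  | cons p ps ih =>
    cases ps with
    | nil => simp [PySem.Chars.join, List.intercalate]
    | cons q ps' =>
      have h1 : PySem.Chars.join [' '] (p :: q :: ps') =
          p ++ ' ' :: PySem.Chars.join [' '] (q :: ps') := by
        simp [PySem.Chars.join, List.intercalate]
      have h2 : PySem.Chars.join [' '] ((p :: q :: ps').map PySem.Chars.lower) =
          PySem.Chars.lower p ++ ' ' :: PySem.Chars.join [' '] ((q :: ps').map PySem.Chars.lower) := by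
        simp [PySem.Chars.join, List.intercalate]
      rw [h1, h2, ← ih]
      simp [PySem.Chars.lower, show PySem.Chars.lowerChar ' ' = ' ' from by decide]

-- the keyword test a recipe passes, on the chars side
def pvHit (kws : List String) (recipe : List (String × List String)) : Bool :=
  kws.any (fun k => PySem.Str.isIn k (PySem.Str.lower (PySem.Str.join " " (pvIngr recipe))))

-- A's flag loop computes the OR of the per-recipe hits over the guarded recipes
theorem pv_foldl_flags (recipes : List (List (String × List String))) (st : Bool × Bool × Bool) :
    recipes.foldl (fun (st : Bool × Bool × Bool) recipe =>
      if pvGuard recipe then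
        let ingredients_str := PySem.Str.lower (PySem.Str.join " " (pvIngr recipe))
        (st.1 || ["basil", "cilantro", "parsley"].any (fun herb => PySem.Str.isIn herb ingredients_str),
         st.2.1 || ["lettuce", "spinach", "kale"].any (fun green => PySem.Str.isIn green ingredients_str),
         st.2.2 || ["berries", "strawberr", "blueberr"].any (fun berry => PySem.Str.isIn berry ingredients_str))
      else st) st =
    (st.1 || (recipes.filter pvGuard).any (pvHit ["basil", "cilantro", "parsley"]),
     st.2.1 || (recipes.filter pvGuard).any (pvHit ["lettuce", "spinach", "kale"]),
     st.2.2 || (recipes.filter pvGuard).any (pvHit ["berries", "strawberr", "blueberr"])) := by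
  induction recipes generalizing st with
  | nil => simp
  | cons r rs ih =>
    rw [List.foldl_cons]
    by_cases h : pvGuard r = true
    · rw [if_pos h, ih]
      simp [pvHit, h, Bool.or_assoc]
    · rw [if_neg h, ih]
      simp [h]

-- the corpus check for one keyword group = some guarded recipe hits it
theorem pv_corpus_check (kws : List String)
    (hk : kws.all (fun k => !k.toList.isEmpty && !k.toList.contains ' ') = true)
    (recipes : List (List (String × List String))) :
    kws.any (fun k => PySem.Str.isIn k (PySem.Str.lower (PySem.Str.join " "
        ((recipes.filter pvGuard).map (fun recipe => PySem.Str.join " " (pvIngr recipe)))))) =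
    (recipes.filter pvGuard).any (pvHit kws) := by
  have swap : ∀ k : String, k ∈ kws →
      PySem.Str.isIn k (PySem.Str.lower (PySem.Str.join " "
        ((recipes.filter pvGuard).map (fun recipe => PySem.Str.join " " (pvIngr recipe))))) =
      (recipes.filter pvGuard).any
        (fun recipe => PySem.Str.isIn k (PySem.Str.lower (PySem.Str.join " " (pvIngr recipe)))) := by
    intro k hkmem
    have hprops := List.all_eq_true.mp hk k hkmem
    rw [Bool.and_eq_true] at hprops
    have hne : k.toList ≠ [] := by simpa using hprops.1
    have hsp : ' ' ∉ k.toList := by simpa using hprops.2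
    rw [PySem.Str.isIn_eq, PySem.Str.toList_lower, PySem.Str.toList_join]
    have hsep : (" " : String).toList = [' '] := by decide
    rw [hsep, pv_lower_join, pv_isIn_join hne hsp]
    simp [List.map_map, List.any_map, Function.comp, PySem.Str.isIn_eq,
      PySem.Str.toList_lower, PySem.Str.toList_join, hsep]
  rcases hres : (recipes.filter pvGuard).any (pvHit kws) with _ | _
  · rw [Bool.eq_false_iff]
    intro habs
    rcases List.any_eq_true.mp habs with ⟨k, hkmem, hkin⟩
    rw [swap k hkmem] at hkin
    rcases List.any_eq_true.mp hkin with ⟨r, hrmem, hrin⟩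
    have : (recipes.filter pvGuard).any (pvHit kws) = true :=
      List.any_eq_true.mpr ⟨r, hrmem, List.any_eq_true.mpr ⟨k, hkmem, hrin⟩⟩
    simp [hres] at this
  · rcases List.any_eq_true.mp hres with ⟨r, hrmem, hrhit⟩
    rcases List.any_eq_true.mp hrhit with ⟨k, hkmem, hkin⟩
    exact List.any_eq_true.mpr ⟨k, hkmem, (swap k hkmem) ▸
      List.any_eq_true.mpr ⟨r, hrmem, hkin⟩⟩

-- ===== VERDICT (by name: the statement is the Claim_ definition above) =====
theorem generate_storage_tips_py_spec : Claim_equal_generate_storage_tips_py := by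
  intro recipes _
  unfold Spec_generate_storage_tips_py generate_storage_tips_py generate_storage_tips_py_alt
  simp only [pv_foldl_flags, Bool.false_or, List.foldl_cons, List.foldl_nil]
  rw [pv_corpus_check ["basil", "cilantro", "parsley"] (by decide) recipes,
      pv_corpus_check ["lettuce", "spinach", "kale"] (by decide) recipes,
      pv_corpus_check ["berries", "strawberr", "blueberr"] (by decide) recipes]
  rcases (recipes.filter pvGuard).any (pvHit ["basil", "cilantro", "parsley"]) with _ | _ <;>
    rcases (recipes.filter pvGuard).any (pvHit ["lettuce", "spinach", "kale"]) with _ | _ <;>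
      rcases (recipes.filter pvGuard).any (pvHit ["berries", "strawberr", "blueberr"]) with _ | _ <;>
        simp
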